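-- pv_equiv track=rewrite | github.com/agnibha-2002/dodge_ai | backend/app/services/query_parser.py | _resolve_all_entities
-- ===== SOURCE A (Python) =====
-- def _resolve_all_entities(text: str, aliases: dict[str, str]) -> list[str]:
--     """Find ALL entity mentions in the query, longest-match-first."""
--     text_low = text.lower()
--     found: list[str] = []
--     seen: set[str] = set()
--     for alias in sorted(aliases, key=len, reverse=True):
--         if alias in text_low and aliases[alias] not in seen:
--             found.append(aliases[alias])
--             seen.add(aliases[alias])
--     return found
-- ===== SOURCE B (Python) =====
-- def _resolve_all_entities(text: str, aliases: dict[str, str]) -> list[str]: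
--     """Find ALL entity mentions in the query, longest-match-first.
--
--     One pass over the text: index every substring of text.lower() no longer
--     than the longest alias that is itself an alias key; then emit the
--     canonical names longest-alias-first and deduplicate them order-preservingly.
--     """
--     text_low = text.lower()
--     n = len(text_low)
--     max_len = max((len(a) for a in aliases), default=0)
--     present: set[str] = set()
--     for i in range(n + 1):
--         for m in range(min(max_len, n - i) + 1):
--             sub = text_low[i:i + m]
--             if sub in aliases:
--                 present.add(sub)
--     ordered = [aliases[a] for a in sorted(aliases, key=len, reverse=True) if a in present]
--     return list(dict.fromkeys(ordered))
-- ===== Notes on version B (the rewrite author's own statement) =====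
-- stated objective: faster
-- what changed: Instead of scanning the whole text once per alias, B makes one pass over the text indexing every substring up to the longest alias length that is an alias key, so the longest-first dedup loop only does set lookups.
import Mathlib
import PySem

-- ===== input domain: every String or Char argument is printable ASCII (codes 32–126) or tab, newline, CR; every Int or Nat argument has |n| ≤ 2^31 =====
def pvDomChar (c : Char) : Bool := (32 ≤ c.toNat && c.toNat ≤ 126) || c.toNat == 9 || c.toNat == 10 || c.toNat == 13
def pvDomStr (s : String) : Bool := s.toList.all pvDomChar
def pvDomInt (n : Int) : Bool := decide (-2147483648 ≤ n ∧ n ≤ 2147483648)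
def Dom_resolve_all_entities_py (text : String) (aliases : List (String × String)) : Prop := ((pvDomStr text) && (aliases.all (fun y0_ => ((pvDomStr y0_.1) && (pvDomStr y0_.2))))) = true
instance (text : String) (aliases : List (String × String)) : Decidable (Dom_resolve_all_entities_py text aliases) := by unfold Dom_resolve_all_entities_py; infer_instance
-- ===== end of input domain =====

-- B replaces A's per-al substring scan of the text by ONE pass over the text that indexes every
-- substring (up to the longest alias length) that is an alias key; the final longest-first dedup pass
-- then only does set lookups. Alternative algorithm; ports proved to return the same list.

-- ===== PORT A =====
-- Python's aliases[al] cannot raise here (al is drawn from the dict's own keys),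
-- so it is ported as d.getD al "".
def resolve_all_entities_py (text : String) (aliases : List (String × String)) : List String :=
  let d := PySem.Dict.ofList aliases
  let text_low := PySem.Str.lower text
  let res := (PySem.List.sorted d.keys (fun a => PySem.Str.len a) true).foldl
      (fun (st : List String × PySem.Set String) al =>
        if PySem.Str.isIn al text_low && !(PySem.Set.contains st.2 (d.getD al "")) then
          (st.1 ++ [d.getD al ""], PySem.Set.add st.2 (d.getD al ""))
        else st)
      ([], PySem.Set.empty)
  res.1

-- ===== PORT B =====
-- max((len(a) for a in aliases), default=0)
def pvMaxLen (d : PySem.Dict String String) : Int :=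
  (PySem.List.max? (d.keys.map (fun a => PySem.Str.len a)) (fun x => x)).getD 0

-- the substring index: every text_low[i:i+m] (m <= longest alias) that is an alias key
def pvPresent (text_low : String) (d : PySem.Dict String String) : PySem.Set String :=
  (PySem.List.pyRange 0 (PySem.Str.len text_low + 1)).foldl
    (fun p i =>
      (PySem.List.pyRange 0 (min (pvMaxLen d) (PySem.Str.len text_low - i) + 1)).foldl
        (fun p m =>
          if d.contains (PySem.Str.slice text_low (some i) (some (i + m))) then
            PySem.Set.add p (PySem.Str.slice text_low (some i) (some (i + m)))
          else p)
        p)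
    PySem.Set.empty

def resolve_all_entities_py_alt (text : String) (aliases : List (String × String)) : List String :=
  let d := PySem.Dict.ofList aliases
  let text_low := PySem.Str.lower text
  let present := pvPresent text_low d
  let ordered := ((PySem.List.sorted d.keys (fun a => PySem.Str.len a) true).filter
      (fun al => PySem.Set.contains present al)).map (fun al => d.getD al "")
  PySem.List.dedup ordered

-- ===== PRECONDITION & SPEC =====
def Spec_resolve_all_entities_py (text : String) (aliases : List (String × String)) (out : List String) : Prop := out = resolve_all_entities_py_alt text aliases
instance (text : String) (aliases : List (String × String)) (out : List String) : Decidable (Spec_resolve_all_entities_py text aliases out) := by unfold Spec_resolve_all_entities_py; infer_instance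

-- ===== CLAIM (what is proved, stated in full; the proofs are below) =====
def Claim_equal_resolve_all_entities_py : Prop := ∀ (text : String) (aliases : List (String × String)), Dom_resolve_all_entities_py text aliases → Spec_resolve_all_entities_py text aliases (resolve_all_entities_py text aliases)

-- ===== LEMMAS AND PROOFS =====

-- membership in a fold whose step either adds one element or leaves the set unchanged
theorem pv_mem_foldl_condAdd {α ι : Type} [BEq α] [LawfulBEq α]
    (l : List ι) (c : ι → Bool) (f : ι → α) (p : PySem.Set α) (x : α) :
    x ∈ l.foldl (fun p i => if c i then PySem.Set.add p (f i) else p) p ↔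
      x ∈ p ∨ ∃ i ∈ l, c i = true ∧ f i = x := by
  induction l generalizing p with
  | nil => simp
  | cons a t ih =>
    simp only [List.foldl_cons, ih]
    by_cases h : c a = true
    · simp only [h, if_true, PySem.Set.mem_add, List.mem_cons]
      aesop
    · simp only [h, List.mem_cons]
      aesop

-- membership in an outer fold whose step satisfies a pointwise characterisation
theorem pv_mem_foldl_of_step {α ι : Type} (l : List ι) (g : PySem.Set α → ι → PySem.Set α)
    (Q : ι → Prop) (x : α) (h : ∀ p i, x ∈ g p i ↔ x ∈ p ∨ Q i) (p : PySem.Set α) :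
    x ∈ l.foldl g p ↔ x ∈ p ∨ ∃ i ∈ l, Q i := by
  induction l generalizing p with
  | nil => simp
  | cons a t ih =>
    simp only [List.foldl_cons, ih, h, List.mem_cons]
    aesop

-- every alias key is no longer than pvMaxLen
theorem pv_len_le_maxLen (d : PySem.Dict String String) (x : String) (hx : x ∈ d.keys) :
    PySem.Str.len x ≤ pvMaxLen d := by
  unfold pvMaxLen
  cases h : PySem.List.max? (d.keys.map (fun a => PySem.Str.len a)) (fun x => x) with
  | none =>
    rw [PySem.List.max?_eq_none_iff] at h
    simp [List.eq_nil_of_map_eq_nil h] at hx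
  | some mx =>
    have := PySem.List.max?_isMax h (PySem.Str.len x) (List.mem_map_of_mem hx)
    simpa using this

theorem pv_mem_present (text_low : String) (d : PySem.Dict String String) (x : String) :
    x ∈ pvPresent text_low d ↔ d.contains x = true ∧ x.toList <:+: text_low.toList := by
  unfold pvPresent
  rw [pv_mem_foldl_of_step _ _
      (fun i => ∃ m ∈ PySem.List.pyRange 0 (min (pvMaxLen d) (PySem.Str.len text_low - i) + 1),
        d.contains (PySem.Str.slice text_low (some i) (some (i + m))) = true ∧
          PySem.Str.slice text_low (some i) (some (i + m)) = x)
      x (fun p i => pv_mem_foldl_condAdd _ _ _ p x)]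
  have hlen : PySem.Str.len text_low = (text_low.toList.length : Int) := PySem.Str.len_eq _
  constructor
  · rintro (hemp | ⟨i, hi, m, hm, hc, hs⟩)
    · simp [PySem.Set.empty] at hemp
    · rw [PySem.List.mem_pyRange_one] at hi hm
      subst hs
      refine ⟨hc, ?_⟩
      rw [← String.toList_inj.mpr (rfl : PySem.Str.slice text_low (some i) (some (i + m)) = _)]
      rw [PySem.Str.toList_slice, PySem.Chars.slice_eq_listSlice,
        PySem.List.slice_toNat _ hi.1 (by omega)]
      exact ((List.take_prefix _ _).isInfix).trans ((List.drop_suffix _ _).isInfix)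
  · rintro ⟨hc, hinf⟩
    obtain ⟨s, t, hst⟩ := hinf
    have hx : x ∈ d.keys := (PySem.Dict.contains_iff_mem_keys d x).mp hc
    have hml := pv_len_le_maxLen d x hx
    have hxlen : PySem.Str.len x = (x.toList.length : Int) := PySem.Str.len_eq _
    have hlensum : s.length + x.toList.length + t.length = text_low.toList.length := by
      rw [← hst]; simp; omega
    have hcast : x.length = x.toList.length := by simp
    refine Or.inr ⟨(s.length : Int), ?_, (x.length : Int), ?_, ?_, ?_⟩
    · rw [PySem.List.mem_pyRange_one]; omega
    · rw [PySem.List.mem_pyRange_one]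
      constructor
      · omega
      · omega
    all_goals {
      have hs : PySem.Str.slice text_low (some (s.length : Int)) (some ((s.length : Int) + (x.length : Int))) = x := by
        apply String.toList_inj.mp
        rw [PySem.Str.toList_slice, PySem.Chars.slice_eq_listSlice,
          PySem.List.slice_natCast_add]
        rw [← hst, List.append_assoc, List.drop_left,
          show x.length = x.toList.length by simp, List.take_left]
      simp [hs, hc]
    }

-- the two loop conditions agree on every alias key
theorem pv_cond_eq (text_low : String) (d : PySem.Dict String String) (al : String)
    (h : al ∈ d.keys) :
    PySem.Str.isIn al text_low = PySem.Set.contains (pvPresent text_low d) al := by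
  rw [Bool.eq_iff_iff, PySem.Str.isIn_iff_infix, PySem.Set.contains_iff, pv_mem_present]
  have hc : d.contains al = true := (PySem.Dict.contains_iff_mem_keys d al).mpr h
  tauto

-- A's append/seen loop keeps its output list equal (as a list) to its seen set
theorem pv_fold_pair (c : String → Bool) (v : String → String) (l : List String) :
    ∀ (s : PySem.Set String),
      (l.foldl (fun (st : List String × PySem.Set String) al =>
          if c al && !(PySem.Set.contains st.2 (v al)) then
            (st.1 ++ [v al], PySem.Set.add st.2 (v al))
          else st) (s, s))
        = (l.foldl (fun s al => if c al then PySem.Set.add s (v al) else s) s,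
           l.foldl (fun s al => if c al then PySem.Set.add s (v al) else s) s) := by
  induction l with
  | nil => intro s; rfl
  | cons a t ih =>
    intro s
    simp only [List.foldl_cons]
    by_cases hc : c a
    · by_cases hm : PySem.Set.contains s (v a)
      · have hadd : PySem.Set.add s (v a) = s :=
          PySem.Set.add_of_mem ((PySem.Set.contains_iff s (v a)).mp hm)
        simp only [hc, hm, Bool.not_true, Bool.and_false, if_true, hadd]
        exact ih s
      · have hadd : PySem.Set.add s (v a) = s ++ [v a] :=
          PySem.Set.add_of_not_mem (fun h => hm ((PySem.Set.contains_iff s (v a)).mpr h))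
        simp only [hc, hm, Bool.not_false, Bool.and_true, if_true, hadd]
        exact hadd ▸ ih (PySem.Set.add s (v a))
    · simp only [hc, Bool.false_and]
      exact ih s

-- A's whole loop is: dedup of the canonical names of the matching aliases, in sorted order
theorem pv_fold_dedup (c : String → Bool) (v : String → String) (l : List String) :
    (l.foldl (fun (st : List String × PySem.Set String) al =>
        if c al && !(PySem.Set.contains st.2 (v al)) then
          (st.1 ++ [v al], PySem.Set.add st.2 (v al))
        else st) ([], PySem.Set.empty)).1
      = PySem.List.dedup ((l.filter c).map v) := by
  have h0 : (([], PySem.Set.empty) : List String × PySem.Set String)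
      = ((PySem.Set.empty : PySem.Set String), (PySem.Set.empty : PySem.Set String)) := rfl
  rw [h0, pv_fold_pair]
  rw [PySem.List.dedup_eq_ofList, PySem.Set.ofList_eq_foldl, List.foldl_map, List.foldl_filter]
  rfl

-- ===== VERDICT (by name: the statement is the Claim_ definition above) =====
theorem resolve_all_entities_py_spec : Claim_equal_resolve_all_entities_py := by
  intro text aliases _
  show resolve_all_entities_py text aliases = resolve_all_entities_py_alt text aliases
  unfold resolve_all_entities_py resolve_all_entities_py_alt
  rw [pv_fold_dedup]
  exact congrArg PySem.List.dedup (congrArg (List.map _)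
    (List.filter_congr (fun al hmem =>
      pv_cond_eq (PySem.Str.lower text) (PySem.Dict.ofList aliases) al
        ((PySem.List.mem_sorted _ _ _ _).mp hmem))))
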